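-- pv_equiv track=rewrite | github.com/karlaHH/DeteccionDePlagios | OCRs/conComentarios/ocr32.py | CambioSegundaLineaVertical
-- ===== SOURCE A (Python) =====
-- def CambioSegundaLineaVertical(tam,img):#se asigna el nombre de la función
--     posicionSegundaLineaVertical=int(tam[1]/2)#Declaramos una variable la cual almacenara un valor entero dado por la obtencion del tamaño del numero de columnas
--     contarCambiosSegundaLineaVertical=0#Declaramos un contador que inicializamos en 0
--     aux=img[0][posicionSegundaLineaVertical]#declaramos una variable auxiliar a la cual asignaremos una posicion especifica en la cual queremos que se recorra nuestra matriz para encontrar los cambios efectuados ahi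
--     for i in range(0,tam[0]):#inicializamos nuestro ciclo para recorrer las columnas de la matriz
--         if(aux!=img[i][posicionSegundaLineaVertical]):#declaramos una condicion en la cual especificamos que si nuestra variable auxiliar es diferente del valor que se encuentre en la posicion que inicializamos en el recorrido de la matriz
--             aux=img[i][posicionSegundaLineaVertical]#Cuando la condicion se cumpla le reasignamos el valor a nuestra variable auxiliar para que esta tenga el valor en la que se encuentra la matriz
--             contarCambiosSegundaLineaVertical=contarCambiosSegundaLineaVertical+1#Nuestro contador de cambios aumenta en uno cada vez que la condicion se cumpla
--         #img[i][posicionSegundaLineaVertical]=1#la siguiente linea solo mostrar el recorrido en el cual se detectaran los cambios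
--     return contarCambiosSegundaLineaVertical#se regresa el  valor de la septima característica
-- ===== SOURCE B (Python) =====
-- def _trans(seg):
--     # divide and conquer: transitions in seg = transitions in each half
--     # plus one if the values disagree across the split boundary
--     if len(seg) < 2:
--         return 0
--     m = len(seg) // 2
--     left = seg[:m]
--     right = seg[m:]
--     return _trans(left) + _trans(right) + (1 if left[-1] != right[0] else 0)
--
-- def CambioSegundaLineaVertical(tam, img):
--     col = int(tam[1]/2)
--     column = [img[i][col] for i in range(tam[0])]
--     return _trans(column)
-- ===== Notes on version B (the rewrite author's own statement) =====
-- stated objective: alternative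
-- what changed: B extracts the middle column once and counts value transitions by divide and conquer: recursively split the column in half, sum the transitions of each half plus one if the values across the split boundary differ, instead of A's sequential stateful aux/counter scan.
import Mathlib
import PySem

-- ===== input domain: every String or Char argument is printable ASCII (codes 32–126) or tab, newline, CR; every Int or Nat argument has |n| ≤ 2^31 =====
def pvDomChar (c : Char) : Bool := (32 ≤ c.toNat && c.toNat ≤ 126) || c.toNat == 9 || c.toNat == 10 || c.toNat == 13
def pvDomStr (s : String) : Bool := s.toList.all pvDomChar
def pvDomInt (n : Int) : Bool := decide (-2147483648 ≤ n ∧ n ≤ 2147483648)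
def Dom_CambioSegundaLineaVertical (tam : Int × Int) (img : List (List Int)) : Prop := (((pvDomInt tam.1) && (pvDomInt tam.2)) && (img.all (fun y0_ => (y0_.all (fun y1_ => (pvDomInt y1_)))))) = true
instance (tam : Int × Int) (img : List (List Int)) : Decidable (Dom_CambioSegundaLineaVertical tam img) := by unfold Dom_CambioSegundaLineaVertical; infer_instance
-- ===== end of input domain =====

-- B counts the middle column's value transitions by divide and conquer (split the
-- column in half, sum both halves' transitions plus the boundary mismatch) instead
-- of A's sequential stateful aux/counter scan: a different decomposition, not faster.

-- ===== PORT A =====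
-- A's stateful loop: aux starts at img[0][col]; for i in range(tam[0]) compare and count.
-- int(tam[1]/2) truncates toward zero (|tam[1]| ≤ 2^31, so float division is exact) → Int.tdiv.
-- Out-of-range indexing (Python IndexError) is defaulted with getD 0; Pre_ excludes those inputs.
def CambioSegundaLineaVertical (tam : Int × Int) (img : List (List Int)) : Int :=
  let pos : Int := tam.2.tdiv 2
  let aux0 : Int := PySem.List.pyGetD (PySem.List.pyGetD img 0 []) pos 0
  let st := (PySem.List.pyRange 0 tam.1 1).foldl
    (fun (s : Int × Int) i =>
      let v := PySem.List.pyGetD (PySem.List.pyGetD img i []) pos 0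
      if s.1 ≠ v then (v, s.2 + 1) else s) (aux0, 0)
  st.2

-- ===== PORT B =====
-- B's helper _trans: divide and conquer on the segment (seg[:m], seg[m:], boundary).
def pvTrans (seg : List Int) : Int :=
  if h : seg.length < 2 then 0
  else
    let m : Nat := seg.length / 2
    let left := PySem.List.slice seg none (some (m : Int))
    let right := PySem.List.slice seg (some (m : Int)) none
    pvTrans left + pvTrans right +
      (if PySem.List.pyGetD left (-1) 0 ≠ PySem.List.pyGetD right 0 0 then 1 else 0)
termination_by seg.length
decreasing_by
  · rw [PySem.List.slice_to_natCast]; simp; omega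
  · rw [PySem.List.slice_from_natCast]; simp; omega

-- B: build the column, then count transitions with the divide-and-conquer helper.
def CambioSegundaLineaVertical_alt (tam : Int × Int) (img : List (List Int)) : Int :=
  let pos : Int := tam.2.tdiv 2
  let column : List Int := (PySem.List.pyRange 0 tam.1 1).map
    (fun i => PySem.List.pyGetD (PySem.List.pyGetD img i []) pos 0)
  pvTrans column

-- ===== PRECONDITION & SPEC =====
-- Pre_ = exactly the inputs where Python A returns: img[0][col] exists (A always reads it)
-- and img[i][col] exists for every i in range(tam[0]).
def Pre_CambioSegundaLineaVertical (tam : Int × Int) (img : List (List Int)) : Prop :=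
  let pos : Int := tam.2.tdiv 2
  1 ≤ img.length ∧ PySem.Raise.InRange (img.headD []).length pos ∧
  tam.1.toNat ≤ img.length ∧
  ∀ row ∈ img.take tam.1.toNat, PySem.Raise.InRange row.length pos
instance (tam : Int × Int) (img : List (List Int)) : Decidable (Pre_CambioSegundaLineaVertical tam img) := by unfold Pre_CambioSegundaLineaVertical; infer_instance

def pvWitness_CambioSegundaLineaVertical : (Int × Int) × List (List Int) :=
  ((2, 3), [[5, 7, 9], [5, 8, 9]])

def Spec_CambioSegundaLineaVertical (tam : Int × Int) (img : List (List Int)) (out : Int) : Prop := out = CambioSegundaLineaVertical_alt tam img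
instance (tam : Int × Int) (img : List (List Int)) (out : Int) : Decidable (Spec_CambioSegundaLineaVertical tam img out) := by unfold Spec_CambioSegundaLineaVertical; infer_instance

-- ===== CLAIM (what is proved, stated in full; the proofs are below) =====
def Claim_equal_CambioSegundaLineaVertical : Prop := ∀ (tam : Int × Int) (img : List (List Int)), Dom_CambioSegundaLineaVertical tam img → Pre_CambioSegundaLineaVertical tam img → Spec_CambioSegundaLineaVertical tam img (CambioSegundaLineaVertical tam img)

-- ===== LEMMAS AND PROOFS =====

-- Reference count: number of adjacent mismatching pairs of a list.
def pvAdj (l : List Int) : Int :=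
  (l.zip l.tail).foldl (fun acc p => if p.1 ≠ p.2 then acc + 1 else acc) 0

theorem pvFoldShift (l : List (Int × Int)) (c : Int) :
    l.foldl (fun acc p => if p.1 ≠ p.2 then acc + 1 else acc) c
      = c + l.foldl (fun acc p => if p.1 ≠ p.2 then acc + 1 else acc) 0 := by
  induction l generalizing c with
  | nil => simp
  | cons p t ih =>
    simp only [List.foldl_cons]
    rw [ih, ih (if p.1 ≠ p.2 then (0:Int) + 1 else 0)]
    split_ifs <;> ring

theorem pvAdj_cons (x y : Int) (l : List Int) :
    pvAdj (x :: y :: l) = (if x ≠ y then 1 else 0) + pvAdj (y :: l) := by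
  simp only [pvAdj, List.tail_cons, List.zip_cons_cons, List.foldl_cons]
  rw [pvFoldShift]
  split_ifs <;> simp

-- Splitting lemma: adjacent mismatches across a concatenation of nonempty lists.
theorem pvAdj_append (l1 l2 : List Int) (h1 : l1 ≠ []) (h2 : l2 ≠ []) :
    pvAdj (l1 ++ l2)
      = pvAdj l1 + pvAdj l2
        + (if l1.getLast h1 ≠ l2.headD 0 then 1 else 0) := by
  induction l1 with
  | nil => exact absurd rfl h1
  | cons x t ih =>
    cases t with
    | nil =>
      cases l2 with
      | nil => exact absurd rfl h2
      | cons b s =>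
        rw [List.singleton_append, pvAdj_cons]
        simp [pvAdj]
        split_ifs <;> ring
    | cons y t' =>
      rw [List.cons_append, List.cons_append, pvAdj_cons, ← List.cons_append,
        ih (by simp), pvAdj_cons]
      simp [List.getLast_cons]
      split_ifs <;> ring

-- pvTrans computes the adjacent-mismatch count.
theorem pvTrans_eq_adj (seg : List Int) : pvTrans seg = pvAdj seg := by
  induction hn : seg.length using Nat.strong_induction_on generalizing seg with
  | _ n ih =>
    subst hn
    rw [pvTrans]
    by_cases h : seg.length < 2
    · interval_cases hl : seg.length
      · simp [List.length_eq_zero_iff.mp hl, pvAdj]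
      · obtain ⟨a, rfl⟩ := List.length_eq_one_iff.mp hl
        simp [pvAdj]
    · rw [dif_neg h]
      have hm1 : 1 ≤ seg.length / 2 := by omega
      have hm2 : seg.length / 2 < seg.length := by omega
      simp only [PySem.List.slice_to_natCast, PySem.List.slice_from_natCast]
      have hL : seg.take (seg.length / 2) ≠ [] := by
        simp only [ne_eq, List.take_eq_nil_iff, not_or]
        exact ⟨by omega, fun hc => h (by simp [hc])⟩
      have hR : seg.drop (seg.length / 2) ≠ [] := by
        simp [List.drop_eq_nil_iff]; omega
      rw [ih _ (by simp [List.length_take]; omega) _ rfl,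
          ih _ (by simp [List.length_drop]; omega) _ rfl]
      have hsplit := pvAdj_append (seg.take (seg.length / 2))
        (seg.drop (seg.length / 2)) hL hR
      rw [List.take_append_drop] at hsplit
      rw [hsplit, PySem.List.pyGetD_neg_one _ 0 hL, PySem.List.pyGetD_zero]
      have : (seg.drop (seg.length / 2)).getD 0 0 = (seg.drop (seg.length / 2)).headD 0 := by
        cases seg.drop (seg.length / 2) <;> simp
      rw [this]

-- A's loop over the column equals the adjacent-mismatch count starting from aux a.
theorem pvLoop_eq_adj (l : List Int) (a c : Int) :
    (l.foldl (fun (s : Int × Int) v => if s.1 ≠ v then (v, s.2 + 1) else s) (a, c)).2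
      = c + pvAdj (a :: l) := by
  induction l generalizing a c with
  | nil => simp [pvAdj]
  | cons v t ih =>
    simp only [List.foldl_cons]
    rw [pvAdj_cons]
    by_cases h : a = v
    · subst h
      rw [if_neg (by simp), ih]
      simp
    · rw [if_pos h, ih]
      simp [h]
      ring

theorem pvMain (g : Int → Int) (n : Int) (hn : 0 < n) :
    ((PySem.List.pyRange 0 n 1).foldl
        (fun (s : Int × Int) i => if s.1 ≠ g i then (g i, s.2 + 1) else s) (g 0, 0)).2
      = pvAdj ((PySem.List.pyRange 0 n 1).map g) := by
  rw [PySem.List.pyRange_one_cons hn]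
  simp only [List.foldl_cons, List.map_cons]
  rw [if_neg (by simp)]
  have h := pvLoop_eq_adj ((PySem.List.pyRange (0 + 1) n 1).map g) (g 0) 0
  rw [List.foldl_map] at h
  rw [h]
  simp

theorem CambioSegundaLineaVertical_eq_alt (tam : Int × Int) (img : List (List Int)) :
    CambioSegundaLineaVertical tam img = CambioSegundaLineaVertical_alt tam img := by
  unfold CambioSegundaLineaVertical CambioSegundaLineaVertical_alt
  rw [pvTrans_eq_adj]
  by_cases hn : tam.1 ≤ 0
  · rw [PySem.List.pyRange_one_eq_nil hn]
    simp [pvAdj]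
  · exact pvMain (fun i => PySem.List.pyGetD (PySem.List.pyGetD img i []) (tam.2.tdiv 2) 0)
      tam.1 (by omega)

-- ===== VERDICT (by name: the statement is the Claim_ definition above) =====
theorem CambioSegundaLineaVertical_spec : Claim_equal_CambioSegundaLineaVertical := by
  intro tam img _ _
  unfold Spec_CambioSegundaLineaVertical
  exact CambioSegundaLineaVertical_eq_alt tam img
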